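-- pv_equiv track=rewrite | github.com/arpit-saxena/col100 | bignum.py | addshift
-- ===== SOURCE A (Python) =====
-- def addshift(res, c, k):
-- 	if len(res) > len(c) + k:
-- 		c.extend([0] * (len(res) - len(c) - k))
-- 	elif len(c) + k > len(res):
-- 		res.extend([0] * (len(c) + k - len(res)))
-- 	#assert: len(c) + k = len(res)
--
-- 	i = k
-- 	carry = 0
-- 	#INV: VAL(res) + carry * 10^i = VAL(res0[0..i-1]) + VAL(c[0..i-k-1]) * 10^k; k <= i <= len(res)
-- 	while i < len(res):
-- 		s = res[i] + c[i-k] + carry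
-- 		res[i] = s % 10
-- 		carry = s // 10
-- 		i += 1
--
-- 	if carry != 0:
-- 		res.append(carry)
--
-- 	#assert: VAL(res) = VAL(res0) + VAL(c) * 10^k
-- 	return res
-- ===== SOURCE B (Python) =====
-- def _val(ds):
--     # divide and conquer: the integer a little-endian digit list denotes
--     if len(ds) <= 1:
--         return ds[0] if ds else 0
--     h = len(ds) // 2
--     return _val(ds[:h]) + 10 ** h * _val(ds[h:])
--
-- def _digits(m, t):
--     # m least-significant floored base-10 digits of t, plus the remaining quotient
--     if m == 0:
--         return [], t
--     if m == 1:
--         q, r = divmod(t, 10)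
--         return [r], q
--     h = m // 2
--     q, r = divmod(t, 10 ** h)
--     low, _ = _digits(h, r)        # r in [0, 10**h): its quotient past h digits is 0
--     high, rest = _digits(m - h, q)
--     return low + high, rest
--
-- def addshift(res, c, k):
--     # same in-place length-alignment prologue as A (mutates c or res)
--     if len(res) > len(c) + k:
--         c.extend([0] * (len(res) - len(c) - k))
--     elif len(c) + k > len(res):
--         res.extend([0] * (len(c) + k - len(res)))
--     # big-integer route: fold both overlapping tails into one integer, add,
--     # then re-digitize that one integer back into res[k:]
--     total = _val(res[k:]) + _val(c)
--     tail, rest = _digits(len(res) - k, total)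
--     res[k:] = tail
--     if rest != 0:
--         res.append(rest)
--     return res
-- ===== Notes on version B (the rewrite author's own statement) =====
-- stated objective: alternative
-- what changed: Replaces A's per-position digit addition with carry propagation by big-integer arithmetic: B converts res[k:] and c to single integers by divide-and-conquer, adds them, and re-digitizes the sum back into res[k:] by divide-and-conquer divmod; no digit-wise carry is ever propagated.
-- outside the precondition, e.g. on addshift([1, 2], [3, 4, 5], -1): A returns [5, 0, 1], B returns [1, 5, 4, 5]
import Mathlib
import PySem

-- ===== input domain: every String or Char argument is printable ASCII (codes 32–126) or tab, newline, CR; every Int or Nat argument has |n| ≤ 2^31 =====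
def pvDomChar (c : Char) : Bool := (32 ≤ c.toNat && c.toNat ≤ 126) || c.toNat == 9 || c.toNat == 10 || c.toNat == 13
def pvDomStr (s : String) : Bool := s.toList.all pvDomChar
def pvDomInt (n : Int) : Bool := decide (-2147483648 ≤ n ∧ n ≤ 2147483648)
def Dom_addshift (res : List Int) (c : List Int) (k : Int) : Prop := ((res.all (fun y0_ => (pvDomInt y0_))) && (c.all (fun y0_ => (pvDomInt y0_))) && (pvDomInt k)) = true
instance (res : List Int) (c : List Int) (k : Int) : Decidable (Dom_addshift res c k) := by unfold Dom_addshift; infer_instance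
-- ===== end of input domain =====

-- B replaces A's per-position carry-propagating addition by big-integer arithmetic: it converts
-- res[k:] and c to single integers by divide-and-conquer, adds them, and re-digitizes the sum
-- back into res[k:] by divide-and-conquer divmod; return value and in-place mutations of res/c
-- match A's on the stated domain (k ≥ 0).

-- the length-alignment prologue: these Python lines are verbatim identical in Source A and Source B
def padAlign (res : List Int) (c : List Int) (k : Int) : List Int × List Int :=
  if (res.length : Int) > (c.length : Int) + k then
    (res, c ++ List.replicate ((res.length : Int) - (c.length : Int) - k).toNat 0)
  else if (c.length : Int) + k > (res.length : Int) then
    (res ++ List.replicate ((c.length : Int) + k - (res.length : Int)).toNat 0, c)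
  else (res, c)

-- ===== PORT A =====
-- the while loop: fuel = number of remaining iterations; res[i]/c[i-k] are in range under
-- Pre_ (0 ≤ k and aligned lengths), so pyGetD's default 0 is never used there
def addshiftLoopA (cs : List Int) (k : Int) : Nat → List Int → Int → Int → List Int × Int
  | 0, r, _, carry => (r, carry)
  | Nat.succ f, r, i, carry =>
    if i < (r.length : Int) then
      let s := PySem.List.pyGetD r i 0 + PySem.List.pyGetD cs (i - k) 0 + carry
      addshiftLoopA cs k f (r.set i.toNat (PySem.Int.mod s 10)) (i + 1) (PySem.Int.floordiv s 10)
    else (r, carry)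

def addshift (res : List Int) (c : List Int) (k : Int) : List Int :=
  let rc := padAlign res c k
  let out := addshiftLoopA rc.2 k ((rc.1.length : Int) - k).toNat rc.1 k 0
  if out.2 ≠ 0 then out.1 ++ [out.2] else out.1

-- ===== PORT B =====
-- helper _val of Source B: divide-and-conquer value of a little-endian digit list;
-- ds[:h] / ds[h:] with 0 ≤ h = len//2 are exactly take/drop (Python // on the nonneg length = Nat division)
def pvValF : Nat → List Int → Int
  | 0, _ => 0      -- fuel exhausted: unreachable, the halves are strictly shorter
  | Nat.succ f, ds =>
    if ds.length ≤ 1 then (match ds with | [] => 0 | d :: _ => d)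
    else pvValF f (ds.take (ds.length / 2)) + 10 ^ (ds.length / 2) * pvValF f (ds.drop (ds.length / 2))

def pvVal (ds : List Int) : Int := pvValF ds.length ds

-- helper _digits of Source B: m least-significant floored base-10 digits of t, plus the remaining
-- quotient; divmod(t, d) with d > 0 is (floordiv t d, mod t d); 10**h has h = m//2 ≥ 1 in the
-- recursive branch, so integer exponentiation is 10 ^ h.toNat; Python raises on m < 0
-- (float power), which is unreachable with k ≥ 0 after the prologue
def pvDigitsF : Nat → Int → Int → List Int × Int
  | 0, _, t => ([], t)      -- fuel exhausted: unreachable, both recursive arguments are strictly smaller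
  | Nat.succ f, m, t =>
    if m = 0 then ([], t)
    else if m = 1 then ([PySem.Int.mod t 10], PySem.Int.floordiv t 10)
    else if 1 < m then
      let h := PySem.Int.floordiv m 2
      let q := PySem.Int.floordiv t (10 ^ h.toNat)
      let r := PySem.Int.mod t (10 ^ h.toNat)
      let low := (pvDigitsF f h r).1
      let hi := pvDigitsF f (m - h) q
      (low ++ hi.1, hi.2)
    else ([], t)

def pvDigits (m : Int) (t : Int) : List Int × Int := pvDigitsF (m.toNat + 1) m t

def addshift_alt (res : List Int) (c : List Int) (k : Int) : List Int :=
  let rc := padAlign res c k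
  let total := pvVal (PySem.List.slice rc.1 (some k) none) + pvVal rc.2
  let dr := pvDigits ((rc.1.length : Int) - k) total
  let r2 := PySem.List.slice rc.1 none (some k) ++ dr.1   -- res[k:] = tail, exact for 0 ≤ k
  if dr.2 ≠ 0 then r2 ++ [dr.2] else r2

-- ===== PRECONDITION & SPEC =====
-- Pre_ excludes negative k (outside the natural domain of a left-shift amount): there A
-- reads and writes res through Python's negative-index wraparound, or raises IndexError.
def Pre_addshift (res : List Int) (c : List Int) (k : Int) : Prop := 0 ≤ k
instance (res : List Int) (c : List Int) (k : Int) : Decidable (Pre_addshift res c k) := by unfold Pre_addshift; infer_instance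
def pvWitness_addshift : List Int × List Int × Int := ([1, 2, 3], [4, 5], 1)

def Spec_addshift (res : List Int) (c : List Int) (k : Int) (out : List Int) : Prop := out = addshift_alt res c k
instance (res : List Int) (c : List Int) (k : Int) (out : List Int) : Decidable (Spec_addshift res c k out) := by unfold Spec_addshift; infer_instance

-- ===== CLAIM (what is proved, stated in full; the proofs are below) =====
def Claim_equal_addshift : Prop := ∀ (res : List Int) (c : List Int) (k : Int), Dom_addshift res c k → Pre_addshift res c k → Spec_addshift res c k (addshift res c k)

-- ===== LEMMAS AND PROOFS =====

-- proof-side normalizer: left-to-right carry propagation over a list of digit sums (A's loop)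
def pvNorm : List Int → Int → List Int × Int
  | [], carry => ([], carry)
  | s :: t, carry =>
    let r := pvNorm t (PySem.Int.floordiv (s + carry) 10)
    (PySem.Int.mod (s + carry) 10 :: r.1, r.2)

-- proof-side digit extractor: f least-significant floored base-10 digits of t, plus what remains
def pvExtract : Nat → Int → List Int × Int
  | 0, t => ([], t)
  | Nat.succ f, t =>
    let r := pvExtract f (PySem.Int.floordiv t 10)
    (PySem.Int.mod t 10 :: r.1, r.2)

-- proof-side value of a little-endian digit list
def pvVz : List Int → Int
  | [] => 0
  | d :: t => d + 10 * pvVz t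

theorem pvVz_append (a b : List Int) : pvVz (a ++ b) = pvVz a + 10 ^ a.length * pvVz b := by
  induction a with
  | nil => simp [pvVz]
  | cons x t ih => simp [pvVz, ih, pow_succ]; ring

theorem pvValF_eq_vz (f : Nat) : ∀ ds : List Int, ds.length ≤ f → pvValF f ds = pvVz ds := by
  induction f with
  | zero => intro ds h; match ds with | [] => rfl | _ :: _ => simp at h
  | succ f ih =>
    intro ds h
    simp only [pvValF]
    by_cases h1 : ds.length ≤ 1
    · simp only [if_pos h1]
      match ds with
      | [] => rfl
      | [d] => simp [pvVz]
      | _ :: _ :: _ => simp at h1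
    · simp only [if_neg h1]
      rw [ih _ (by simp only [List.length_take]; omega),
          ih _ (by simp only [List.length_drop]; omega)]
      have := pvVz_append (ds.take (ds.length / 2)) (ds.drop (ds.length / 2))
      rw [List.take_append_drop] at this
      rw [this, List.length_take, Nat.min_eq_left (by omega)]

theorem pvVal_eq_vz (ds : List Int) : pvVal ds = pvVz ds := pvValF_eq_vz ds.length ds le_rfl

theorem pvVz_zip_add (a b : List Int) (h : a.length = b.length) :
    pvVz ((a.zip b).map (fun p => p.1 + p.2)) = pvVz a + pvVz b := by
  induction a generalizing b with
  | nil => cases b with | nil => simp [pvVz] | cons x t => simp at h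
  | cons x t ih =>
    cases b with
    | nil => simp at h
    | cons y u =>
      simp only [List.zip_cons_cons, List.map_cons, pvVz]
      rw [ih u (by simpa using h)]; ring

theorem pvNorm_eq_extract (ss : List Int) : ∀ carry : Int,
    pvNorm ss carry = pvExtract ss.length (pvVz ss + carry) := by
  induction ss with
  | nil => intro carry; simp [pvNorm, pvExtract, pvVz]
  | cons s t ih =>
    intro carry
    have h10 : (0 : Int) < 10 := by norm_num
    have hmod : PySem.Int.mod (s + 10 * pvVz t + carry) 10 = PySem.Int.mod (s + carry) 10 := by
      rw [PySem.Int.mod_eq_emod_of_pos h10, PySem.Int.mod_eq_emod_of_pos h10]; omega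
    have hdiv : PySem.Int.floordiv (s + 10 * pvVz t + carry) 10
        = pvVz t + PySem.Int.floordiv (s + carry) 10 := by
      rw [PySem.Int.floordiv_eq_ediv_of_pos h10, PySem.Int.floordiv_eq_ediv_of_pos h10]; omega
    simp only [pvNorm, pvVz, List.length_cons, pvExtract, hmod, hdiv, ih]

-- the digits only depend on t modulo 10^a
theorem pvExtract_fst_shift (a : Nat) : ∀ (t y : Int),
    (pvExtract a (t + 10 ^ a * y)).1 = (pvExtract a t).1 := by
  induction a with
  | zero => intro t y; rfl
  | succ f ih =>
    intro t y
    have h10 : (0 : Int) < 10 := by norm_num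
    have hmod : PySem.Int.mod (t + 10 ^ (f + 1) * y) 10 = PySem.Int.mod t 10 := by
      rw [PySem.Int.mod_eq_emod_of_pos h10, PySem.Int.mod_eq_emod_of_pos h10,
        show t + 10 ^ (f + 1) * y = t + 10 * (10 ^ f * y) by ring]
      exact Int.add_mul_emod_self_left t 10 (10 ^ f * y)
    have hdiv : PySem.Int.floordiv (t + 10 ^ (f + 1) * y) 10
        = PySem.Int.floordiv t 10 + 10 ^ f * y := by
      rw [PySem.Int.floordiv_eq_ediv_of_pos h10, PySem.Int.floordiv_eq_ediv_of_pos h10,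
        show t + 10 ^ (f + 1) * y = t + 10 * (10 ^ f * y) by ring]
      exact Int.add_mul_ediv_left t (10 ^ f * y) (by norm_num)
    simp only [pvExtract, hmod, hdiv, ih]

theorem pvExtract_snd (a : Nat) : ∀ t : Int, (pvExtract a t).2 = t / 10 ^ a := by
  induction a with
  | zero => intro t; simp [pvExtract]
  | succ f ih =>
    intro t
    simp only [pvExtract, ih, PySem.Int.floordiv_eq_ediv_of_pos (by norm_num : (0:Int) < 10)]
    rw [Int.ediv_ediv_of_nonneg (show (0:Int) ≤ 10 by norm_num), pow_succ, mul_comm (10 ^ f) 10]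

-- splitting the extraction at a
theorem pvExtract_add (a b : Nat) : ∀ t : Int,
    pvExtract (a + b) t = ((pvExtract a t).1 ++ (pvExtract b ((pvExtract a t).2)).1,
                           (pvExtract b ((pvExtract a t).2)).2) := by
  induction a with
  | zero => intro t; simp [pvExtract]
  | succ f ih =>
    intro t
    have : f + 1 + b = (f + b) + 1 := by omega
    rw [this]
    simp only [pvExtract, ih, List.cons_append]

-- the D&C digitizer agrees with the sequential extractor
theorem pvDigitsF_eq_extract (f : Nat) : ∀ (m t : Int), 0 ≤ m → m.toNat < f →
    pvDigitsF f m t = pvExtract m.toNat t := by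
  induction f with
  | zero => intro m t hm hf; omega
  | succ f ih =>
    intro m t hm hf
    simp only [pvDigitsF]
    by_cases h0 : m = 0
    · simp [h0, pvExtract]
    by_cases h1 : m = 1
    · subst h1
      simp [pvExtract]
    have h2 : 1 < m := by omega
    simp only [if_neg h0, if_neg h1, if_pos h2]
    have hpos : (0 : Int) < 10 ^ (PySem.Int.floordiv m 2).toNat := by positivity
    have hh : PySem.Int.floordiv m 2 = m / 2 := PySem.Int.floordiv_eq_ediv_of_pos (by norm_num)
    have hh0 : 0 ≤ PySem.Int.floordiv m 2 := by omega
    have hh1 : (PySem.Int.floordiv m 2).toNat < f := by omega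
    have hh2 : 0 ≤ m - PySem.Int.floordiv m 2 := by omega
    have hh3 : (m - PySem.Int.floordiv m 2).toNat < f := by omega
    rw [ih _ _ hh0 hh1, ih _ _ hh2 hh3]
    set a := (PySem.Int.floordiv m 2).toNat with ha
    have hsplit : m.toNat = a + (m - PySem.Int.floordiv m 2).toNat := by omega
    rw [hsplit, pvExtract_add]
    have hq : PySem.Int.floordiv t (10 ^ a) = t / 10 ^ a := PySem.Int.floordiv_eq_ediv_of_pos hpos
    have hr : PySem.Int.mod t (10 ^ a) = t % 10 ^ a := PySem.Int.mod_eq_emod_of_pos hpos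
    have hfst : (pvExtract a (t % 10 ^ a)).1 = (pvExtract a t).1 := by
      have ht : t = t % 10 ^ a + 10 ^ a * (t / 10 ^ a) := (Int.emod_add_mul_ediv t (10 ^ a)).symm
      conv_rhs => rw [ht]
      rw [pvExtract_fst_shift]
    simp only [hq, hr, hfst, pvExtract_snd]

theorem pvDigits_eq_extract (m t : Int) (hm : 0 ≤ m) :
    pvDigits m t = pvExtract m.toNat t :=
  pvDigitsF_eq_extract (m.toNat + 1) m t hm (by omega)

theorem pvLoopA_spec (suf : List Int) : ∀ (pre cs : List Int) (k carry : Int) (j : Nat),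
    (pre.length : Int) = k + j → j + suf.length = cs.length →
    addshiftLoopA cs k suf.length (pre ++ suf) (pre.length : Int) carry
      = (pre ++ (pvNorm ((suf.zip (cs.drop j)).map (fun p => p.1 + p.2)) carry).1,
         (pvNorm ((suf.zip (cs.drop j)).map (fun p => p.1 + p.2)) carry).2) := by
  induction suf with
  | nil => intro pre cs k carry j h1 h2; simp [addshiftLoopA, pvNorm]
  | cons s t ih =>
    intro pre cs k carry j h1 h2
    have hj : j < cs.length := by simp only [List.length_cons] at h2; omega
    have hlt : (pre.length : Int) < ((pre ++ s :: t).length : Int) := by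
      simp only [List.length_append, List.length_cons]; push_cast; omega
    have hget : PySem.List.pyGetD (pre ++ s :: t) (pre.length : Int) 0 = s := by
      rw [PySem.List.pyGetD_natCast]
      simp
    have hgetc : PySem.List.pyGetD cs ((pre.length : Int) - k) 0 = cs[j] := by
      have hjk : (pre.length : Int) - k = ((j : Nat) : Int) := by omega
      rw [hjk, PySem.List.pyGetD_natCast, List.getD_eq_getElem _ _ hj]
    have hset : ∀ v : Int, (pre ++ s :: t).set ((pre.length : Int)).toNat v = (pre ++ [v]) ++ t := by
      intro v
      simp [List.append_assoc]
    have hdrop : cs.drop j = cs[j] :: cs.drop (j + 1) := List.drop_eq_getElem_cons hj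
    simp only [List.length_cons, addshiftLoopA, if_pos hlt, hget, hgetc, hset]
    have harg : (pre.length : Int) + 1 = ((pre ++ [PySem.Int.mod (s + cs[j] + carry) 10]).length : Int) := by
      simp
    rw [harg, ih (pre ++ [PySem.Int.mod (s + cs[j] + carry) 10]) cs k _ (j + 1)
          (by simp only [List.length_append, List.length_singleton]; push_cast; omega)
          (by simp only [List.length_cons] at h2; omega)]
    rw [hdrop]
    simp only [List.zip_cons_cons, List.map_cons, pvNorm, List.append_assoc, List.singleton_append]

theorem padAlign_len (res : List Int) (c : List Int) (k : Int) :
    ((padAlign res c k).1.length : Int) = ((padAlign res c k).2.length : Int) + k := by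
  unfold padAlign
  split_ifs with h1 h2 <;> simp only [List.length_append, List.length_replicate] <;> push_cast <;> omega

theorem pvMain (r1 cs : List Int) (k : Int) (hk : 0 ≤ k)
    (hlen : (r1.length : Int) = (cs.length : Int) + k) :
    (let out := addshiftLoopA cs k ((r1.length : Int) - k).toNat r1 k 0
     if out.2 ≠ 0 then out.1 ++ [out.2] else out.1)
    = (let total := pvVal (PySem.List.slice r1 (some k) none) + pvVal cs
       let dr := pvDigits ((r1.length : Int) - k) total
       let r2 := PySem.List.slice r1 none (some k) ++ dr.1
       if dr.2 ≠ 0 then r2 ++ [dr.2] else r2) := by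
  have hkle : k.toNat ≤ r1.length := by omega
  have hsplit : r1.take k.toNat ++ r1.drop k.toNat = r1 := List.take_append_drop _ _
  have hplen : ((r1.take k.toNat).length : Int) = k + ((0 : Nat) : Int) := by
    simp [Nat.min_eq_left hkle]; omega
  have hclen : (0 : Nat) + (r1.drop k.toNat).length = cs.length := by
    simp; omega
  have hfuel : ((r1.length : Int) - k).toNat = (r1.drop k.toNat).length := by
    simp; omega
  have hstartv : ((r1.take k.toNat).length : Int) = k := by
    simp [Nat.min_eq_left hkle]; omega
  -- A side
  have hloopA := pvLoopA_spec (r1.drop k.toNat) (r1.take k.toNat) cs k 0 0 hplen hclen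
  rw [hsplit, hstartv] at hloopA
  -- B side: the D&C digitizer of the D&C total equals A's normalizer
  have hdlen : (r1.drop k.toNat).length = cs.length := by omega
  have hsliceF : PySem.List.slice r1 (some k) none = r1.drop k.toNat := PySem.List.slice_from _ hk
  have hsliceT : PySem.List.slice r1 none (some k) = r1.take k.toNat := PySem.List.slice_to _ hk
  have hmnn : 0 ≤ (r1.length : Int) - k := by omega
  have hdig := pvDigits_eq_extract ((r1.length : Int) - k)
    (pvVal (PySem.List.slice r1 (some k) none) + pvVal cs) hmnn
  have hnorm : pvNorm (((r1.drop k.toNat).zip (cs.drop 0)).map (fun p => p.1 + p.2)) 0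
      = pvExtract ((r1.length : Int) - k).toNat
          (pvVal (PySem.List.slice r1 (some k) none) + pvVal cs) := by
    rw [List.drop_zero, pvNorm_eq_extract, pvVz_zip_add _ _ hdlen, hsliceF,
      pvVal_eq_vz, pvVal_eq_vz]
    have hlz : (((r1.drop k.toNat).zip cs).map (fun p : Int × Int => p.1 + p.2)).length
        = (r1.drop k.toNat).length := by
      simp [List.length_zip, hdlen]
    rw [hlz, hfuel]
    ring_nf
  simp only [hfuel] at hdig hnorm ⊢
  simp only [hloopA, hdig, ← hnorm, hsliceT]

-- ===== VERDICT (by name: the statement is the Claim_ definition above) =====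
theorem addshift_spec : Claim_equal_addshift := by
  intro res c k _ hk
  unfold Spec_addshift addshift addshift_alt
  exact pvMain (padAlign res c k).1 (padAlign res c k).2 k hk (padAlign_len res c k)
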